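-- pv_equiv track=rewrite | github.com/PeterJacob/beagle | plotting.py | appropriate_score
-- ===== SOURCE A (Python) =====
-- def appropriate_score(column_names, dataset, dataset_meta):
--     """Returns a score for appropriateness of a simple mosaic plot"""
--     probable_types = [dataset_meta[column_name]['probable_type']
--                       for column_name in column_names]
--     if (len(column_names) == 2 and
--         (sorted(probable_types) == ['Category', 'Category'] or
--          sorted(probable_types) == ['Binary', 'Category'] or
--          sorted(probable_types) == ['Binary', 'Binary'])):
--         return 1  # Moderately appropriate
--     else:
--         return 0  # Not appropriate
-- ===== SOURCE B (Python) =====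
-- def appropriate_score(column_names, dataset, dataset_meta):
--     """Returns a score for appropriateness of a simple mosaic plot"""
--     budget = 2  # a mosaic plot wants exactly two plottable columns
--     for column_name in column_names:
--         if budget == 0:
--             return 0  # too many columns
--         if dataset_meta[column_name]['probable_type'] not in ('Binary', 'Category'):
--             return 0  # a column a mosaic plot cannot show
--         budget -= 1
--     return 1 if budget == 0 else 0
-- ===== Notes on version B (the rewrite author's own statement) =====
-- stated objective: alternative
-- what changed: B never materialises the probable_types list nor sorts it: it streams over column_names once with a countdown budget of 2, exiting early with 0 as soon as a third column appears or a type outside {'Binary','Category'} is met, and returns 1 iff the budget is exhausted exactly (the three sorted pairs A enumerates are precisely all two-element multisets over that set).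
import Mathlib
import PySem

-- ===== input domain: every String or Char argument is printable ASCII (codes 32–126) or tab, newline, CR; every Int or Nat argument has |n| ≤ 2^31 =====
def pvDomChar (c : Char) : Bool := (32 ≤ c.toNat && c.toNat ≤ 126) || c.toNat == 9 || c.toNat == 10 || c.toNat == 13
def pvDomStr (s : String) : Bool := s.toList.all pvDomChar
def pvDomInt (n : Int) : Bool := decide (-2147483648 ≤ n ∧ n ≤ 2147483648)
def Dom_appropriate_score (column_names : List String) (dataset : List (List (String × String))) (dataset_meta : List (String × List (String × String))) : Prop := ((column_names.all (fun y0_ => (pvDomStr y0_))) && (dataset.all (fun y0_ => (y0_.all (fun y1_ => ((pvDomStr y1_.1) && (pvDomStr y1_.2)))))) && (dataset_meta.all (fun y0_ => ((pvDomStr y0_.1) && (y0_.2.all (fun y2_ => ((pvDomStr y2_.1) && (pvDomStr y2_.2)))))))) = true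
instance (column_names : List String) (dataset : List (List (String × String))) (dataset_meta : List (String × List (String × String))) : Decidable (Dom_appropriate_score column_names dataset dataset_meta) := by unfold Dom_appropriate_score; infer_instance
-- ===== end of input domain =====

-- B replaces "build probable_types, sort it, compare with three literal pairs" by a single
-- early-exit pass over column_names with a countdown budget of 2 (alternative decomposition).
-- Pre_ excludes exactly the inputs on which Python A raises KeyError (a column missing from
-- dataset_meta, or its entry lacking 'probable_type').


-- shared lookup helper: dataset_meta[c]['probable_type'] (none = KeyError, excluded by Pre_)
def pvProbType (dataset_meta : List (String × List (String × String))) (c : String) : Option String :=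
  match dataset_meta.lookup c with
  | some m => m.lookup "probable_type"
  | none => none

-- ===== PORT A =====
def appropriate_score (column_names : List String) (dataset : List (List (String × String))) (dataset_meta : List (String × List (String × String))) : Int :=
  let probable_types := column_names.map (fun c => (pvProbType dataset_meta c).getD "")
  if column_names.length = 2 ∧
      (PySem.List.sorted probable_types (fun x => x) false = ["Category", "Category"] ∨
       PySem.List.sorted probable_types (fun x => x) false = ["Binary", "Category"] ∨
       PySem.List.sorted probable_types (fun x => x) false = ["Binary", "Binary"]) then
    1
  else
    0

-- ===== PORT B =====
-- B: single early-exit pass over column_names with a countdown budget of 2; no list, no sort.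
def appropriate_score_alt_go (dataset_meta : List (String × List (String × String))) (names : List String) (budget : Int) : Int :=
  match names with
  | [] => if budget = 0 then 1 else 0
  | name :: rest =>
      if budget = 0 then 0
      else if ¬ ((pvProbType dataset_meta name).getD "" = "Binary" ∨ (pvProbType dataset_meta name).getD "" = "Category") then 0
      else appropriate_score_alt_go dataset_meta rest (budget - 1)

def appropriate_score_alt (column_names : List String) (dataset : List (List (String × String))) (dataset_meta : List (String × List (String × String))) : Int :=
  appropriate_score_alt_go dataset_meta column_names 2

-- ===== PRECONDITION & SPEC =====
-- Pre_: every listed column has a 'probable_type' entry in dataset_meta (otherwise Python A raises KeyError)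
def Pre_appropriate_score (column_names : List String) (dataset : List (List (String × String))) (dataset_meta : List (String × List (String × String))) : Prop :=
  ∀ c ∈ column_names, (pvProbType dataset_meta c).isSome = true
instance (column_names : List String) (dataset : List (List (String × String))) (dataset_meta : List (String × List (String × String))) : Decidable (Pre_appropriate_score column_names dataset dataset_meta) := by unfold Pre_appropriate_score; infer_instance
def pvWitness_appropriate_score : List String × (List (List (String × String))) × (List (String × List (String × String))) :=
  (["a", "b"], [], [("a", [("probable_type", "Binary")]), ("b", [("probable_type", "Category")])])

def Spec_appropriate_score (column_names : List String) (dataset : List (List (String × String))) (dataset_meta : List (String × List (String × String))) (out : Int) : Prop := out = appropriate_score_alt column_names dataset dataset_meta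
instance (column_names : List String) (dataset : List (List (String × String))) (dataset_meta : List (String × List (String × String))) (out : Int) : Decidable (Spec_appropriate_score column_names dataset dataset_meta out) := by unfold Spec_appropriate_score; infer_instance

-- ===== CLAIM (what is proved, stated in full; the proofs are below) =====
def Claim_equal_appropriate_score : Prop := ∀ (column_names : List String) (dataset : List (List (String × String))) (dataset_meta : List (String × List (String × String))), Dom_appropriate_score column_names dataset dataset_meta → Pre_appropriate_score column_names dataset dataset_meta → Spec_appropriate_score column_names dataset dataset_meta (appropriate_score column_names dataset dataset_meta)

-- ===== LEMMAS AND PROOFS =====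

-- sorted of an ordered two-element list is itself
lemma sorted_pair_le (a b : String) (hab : a ≤ b) :
    PySem.List.sorted [a, b] (fun x => x) false = [a, b] :=
  PySem.List.sorted_id_eq_of_perm_of_pairwise _ _ (List.Perm.refl _) (by simpa [String.le_iff_toList_le] using hab)

-- sorted of a reversed two-element list puts the smaller element first
lemma sorted_pair_swap (a b : String) (hab : a ≤ b) :
    PySem.List.sorted [b, a] (fun x => x) false = [a, b] :=
  PySem.List.sorted_id_eq_of_perm_of_pairwise _ _ (List.Perm.swap b a []) (by simpa [String.le_iff_toList_le] using hab)

-- The heart of the equivalence: for a two-element list, "its sort is one of the three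
-- allowed pairs" is the same as "each element is Binary or Category".
lemma sorted_pair_iff (t1 t2 : String) :
    (PySem.List.sorted [t1, t2] (fun x => x) false = ["Category", "Category"] ∨
     PySem.List.sorted [t1, t2] (fun x => x) false = ["Binary", "Category"] ∨
     PySem.List.sorted [t1, t2] (fun x => x) false = ["Binary", "Binary"]) ↔
    ((t1 = "Binary" ∨ t1 = "Category") ∧ (t2 = "Binary" ∨ t2 = "Category")) := by
  constructor
  · intro h
    have h1 : t1 ∈ PySem.List.sorted [t1, t2] (fun x => x) false := by
      rw [PySem.List.mem_sorted]; simp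
    have h2 : t2 ∈ PySem.List.sorted [t1, t2] (fun x => x) false := by
      rw [PySem.List.mem_sorted]; simp
    rcases h with h | h | h <;> rw [h] at h1 h2 <;> simp at h1 h2 <;> tauto
  · rintro ⟨h1 | h1, h2 | h2⟩ <;> subst h1 <;> subst h2
    · exact Or.inr (Or.inr (sorted_pair_le _ _ (le_refl _)))
    · exact Or.inr (Or.inl (sorted_pair_le _ _ (by rw [String.le_iff_toList_le]; decide)))
    · exact Or.inr (Or.inl (sorted_pair_swap _ _ (by rw [String.le_iff_toList_le]; decide)))
    · exact Or.inl (sorted_pair_le _ _ (le_refl _))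

theorem appropriate_score_spec : Claim_equal_appropriate_score := by
  intro column_names dataset dataset_meta _ _
  unfold Spec_appropriate_score appropriate_score appropriate_score_alt
  match column_names with
  | [] => simp [appropriate_score_alt_go]
  | [t] => simp [appropriate_score_alt_go]
  | [t1, t2] =>
    simp only [List.map, List.length, sorted_pair_iff]
    by_cases h1 : ((pvProbType dataset_meta t1).getD "" = "Binary" ∨ (pvProbType dataset_meta t1).getD "" = "Category") <;>
    by_cases h2 : ((pvProbType dataset_meta t2).getD "" = "Binary" ∨ (pvProbType dataset_meta t2).getD "" = "Category") <;>
      simp [appropriate_score_alt_go, h1, h2]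
  | t1 :: t2 :: t3 :: rest =>
    by_cases h1 : ((pvProbType dataset_meta t1).getD "" = "Binary" ∨ (pvProbType dataset_meta t1).getD "" = "Category") <;>
    by_cases h2 : ((pvProbType dataset_meta t2).getD "" = "Binary" ∨ (pvProbType dataset_meta t2).getD "" = "Category") <;>
      simp [appropriate_score_alt_go, h1, h2, List.length]
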